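-- pv_equiv track=rewrite | github.com/KYUSEONGHAN/python-for-coding-test | chapter 11 (그리디 문제)/모험가 길드.py | solve
-- ===== SOURCE A (Python) =====
-- def solve(gongpo: list) -> int:
--     result = 0
--
--     while gongpo:
--         max_num = max(gongpo)
--         del(gongpo[gongpo.index(max_num)])
--         gongpo.sort()
--         gongpo = gongpo[max_num:]
--         result += 1
--
--     return result
-- ===== SOURCE B (Python) =====
-- def solve(gongpo: list) -> int:
--     s = sorted(gongpo)
--     result = 0
--     while s:
--         m = s.pop()
--         s = s[m:]
--         result += 1
--     return result
-- ===== Notes on version B (the rewrite author's own statement) =====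
-- stated objective: simpler
-- what changed: A recomputes max, deletes it by index and re-sorts the list every round; B sorts once up front, then each round just pops the last element (the max of the sorted remainder) and slices, removing the per-round sort, max scan and index search.
import Mathlib
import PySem

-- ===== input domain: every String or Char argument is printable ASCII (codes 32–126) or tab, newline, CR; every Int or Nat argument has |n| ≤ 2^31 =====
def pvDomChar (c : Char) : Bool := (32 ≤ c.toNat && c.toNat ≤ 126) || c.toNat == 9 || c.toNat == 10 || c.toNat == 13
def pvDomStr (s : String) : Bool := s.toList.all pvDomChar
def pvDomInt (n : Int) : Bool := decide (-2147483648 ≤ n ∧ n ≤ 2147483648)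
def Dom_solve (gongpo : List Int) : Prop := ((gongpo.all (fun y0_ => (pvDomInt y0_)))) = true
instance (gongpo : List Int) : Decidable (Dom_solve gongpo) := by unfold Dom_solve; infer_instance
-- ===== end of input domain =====

-- B sorts once and then repeatedly pops the last element and slices, instead of A's
-- per-round max/delete/re-sort; equivalence is about the RETURN value only — Python A
-- mutates its argument (del / in-place sort) while B does not.

-- ===== PORT A =====
-- max(gongpo) on a nonempty list x :: t is the running-max loop
def pyMax (x : Int) (t : List Int) : Int := t.foldl max x

-- A's while loop; the Nat argument is fuel making the recursion structural: each round
-- removes the max, so fuel = initial length is always enough and the guard never fires.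
-- 'del gongpo[gongpo.index(max_num)]' removes the first occurrence of max_num, i.e. List.erase;
-- the max is always a member, so neither step can raise.
def solveLoopF : Nat → List Int → Int → Int
  | _, [], result => result
  | 0, _ :: _, result => result
  | fuel + 1, x :: t, result =>
    let m := pyMax x t
    let g1 := (x :: t).erase m
    let g2 := PySem.List.sorted g1 (fun y => y) false
    let g3 := PySem.List.slice g2 (some m) none
    solveLoopF fuel g3 (result + 1)

def solve (gongpo : List Int) : Int := solveLoopF gongpo.length gongpo 0

-- ===== PORT B =====
-- B's while loop; the Nat argument is fuel making the recursion structural: each round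
-- pops an element, so fuel = len(s) is always enough and the guard never fires.
-- 's.pop()' is PySem.List.pop? with its default index -1 (none on the empty list,
-- but the while guard means the list is nonempty here).
def altLoopF : Nat → List Int → Int → Int
  | 0, _, result => result
  | fuel + 1, s, result =>
    match PySem.List.pop? s with
    | none => result
    | some (m, rest) => altLoopF fuel (PySem.List.slice rest (some m) none) (result + 1)

def solve_alt (gongpo : List Int) : Int :=
  let s := PySem.List.sorted gongpo (fun y => y) false
  altLoopF s.length s 0

-- ===== PRECONDITION & SPEC =====
def Spec_solve (gongpo : List Int) (out : Int) : Prop := out = solve_alt gongpo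
instance (gongpo : List Int) (out : Int) : Decidable (Spec_solve gongpo out) := by unfold Spec_solve; infer_instance

-- ===== CLAIM (what is proved, stated in full; the proofs are below) =====
def Claim_equal_solve : Prop := ∀ (gongpo : List Int), Dom_solve gongpo → Spec_solve gongpo (solve gongpo)

-- ===== LEMMAS AND PROOFS =====

-- one unfolding of A's loop
lemma solveLoopF_cons (f : Nat) (x : Int) (t : List Int) (r : Int) :
    solveLoopF (f + 1) (x :: t) r =
      solveLoopF f (PySem.List.slice (PySem.List.sorted ((x :: t).erase (pyMax x t)) (fun y => y) false)
        (some (pyMax x t)) none) (r + 1) := rfl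

-- the running max is a member and an upper bound
lemma pyMax_mem (x : Int) (t : List Int) : pyMax x t ∈ x :: t := by
  rcases PySem.List.foldl_max_mem t x with h | h
  · simp [pyMax, h]
  · simp [pyMax]; right; exact h

lemma le_pyMax (x : Int) (t : List Int) : ∀ y ∈ x :: t, y ≤ pyMax x t := by
  intro y hy
  rcases List.mem_cons.mp hy with h | h
  · subst h; exact (PySem.List.le_foldl_max t y).1
  · exact (PySem.List.le_foldl_max t x).2 y h

-- the running max of a nonempty ≤-sorted list is its last element
lemma pyMax_eq_getLast (x : Int) (t : List Int) (hp : (x :: t).Pairwise (· ≤ ·)) :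
    pyMax x t = (x :: t).getLast (by simp) := by
  apply le_antisymm
  · have hmem : pyMax x t ∈ x :: t := pyMax_mem x t
    rcases List.mem_iff_getElem.mp hmem with ⟨j, hj, hx⟩
    rw [← hx, List.getLast_eq_getElem]
    rcases Nat.lt_or_ge j ((x :: t).length - 1) with hlt | hge
    · exact List.pairwise_iff_getElem.mp hp j _ hj (by omega) hlt
    · have : j = (x :: t).length - 1 := by omega
      subst this; rfl
  · exact le_pyMax x t _ (List.getLast_mem _)

-- on a sorted nonempty list, erasing the max and re-sorting is dropLast
lemma erase_sort_eq_dropLast (x : Int) (t : List Int) (hp : (x :: t).Pairwise (· ≤ ·)) :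
    PySem.List.sorted ((x :: t).erase (pyMax x t)) (fun y => y) false = (x :: t).dropLast := by
  set s := x :: t with hs
  set m := pyMax x t with hm
  have hne : s ≠ [] := by simp [hs]
  have hgl : s.getLast hne = m := (pyMax_eq_getLast x t hp).symm
  have hperm1 : s.Perm (m :: s.erase m) := List.perm_cons_erase (pyMax_mem x t)
  have hperm2 : s.Perm (m :: s.dropLast) := by
    conv_lhs => rw [← List.dropLast_append_getLast hne, hgl]
    exact List.perm_append_singleton _ _
  have hdperm : s.dropLast.Perm (s.erase m) := List.Perm.cons_inv (hperm2.symm.trans hperm1)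
  have hdsorted : s.dropLast.Pairwise (· ≤ ·) := List.Pairwise.sublist (List.dropLast_sublist _) hp
  exact PySem.List.sorted_id_eq_of_perm_of_pairwise _ _ hdperm hdsorted

-- A's loop gives the same count on any permutation of its list (in particular on sorted input)
lemma solveLoopF_sorted (f : Nat) (g : List Int) (r : Int) :
    solveLoopF f g r = solveLoopF f (PySem.List.sorted g (fun y => y) false) r := by
  cases hg : g with
  | nil => simp [PySem.List.sorted]
  | cons x t =>
    have hperm : (x :: t).Perm (PySem.List.sorted (x :: t) (fun y => y) false) :=
      (PySem.List.sorted_perm (x :: t) (fun y => y) false).symm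
    cases hs : PySem.List.sorted (x :: t) (fun y => y) false with
    | nil => exact absurd ((PySem.List.sorted_eq_nil_iff _ _ _).mp hs) (by simp)
    | cons y u =>
      rw [hs] at hperm
      cases f with
      | zero => rfl
      | succ f =>
        rw [solveLoopF_cons, solveLoopF_cons]
        have hmax : pyMax x t = pyMax y u := by
          apply le_antisymm
          · exact le_pyMax y u _ (hperm.mem_iff.mp (pyMax_mem x t))
          · exact le_pyMax x t _ (hperm.symm.mem_iff.mp (pyMax_mem y u))
        have herase : ((x :: t).erase (pyMax y u)).Perm ((y :: u).erase (pyMax y u)) := by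
          rw [← hmax]
          rw [hmax]; exact hperm.erase _
        rw [hmax, PySem.List.sorted_eq_sorted_of_perm _ _ _ (fun a b h => h) herase]

-- the main correspondence: on a sorted list the two loops coincide step for step
lemma main_corr (f : Nat) : ∀ (s : List Int) (r : Int), s.Pairwise (· ≤ ·) →
    solveLoopF f s r = altLoopF f s r := by
  induction f with
  | zero =>
    intro s r _
    cases s <;> rfl
  | succ f ih =>
    intro s r hp
    cases s with
    | nil => rfl
    | cons x t =>
      have hne : x :: t ≠ [] := by simp
      have hpop : PySem.List.pop? (x :: t) = some ((x :: t).getLast hne, (x :: t).dropLast) := by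
        conv_lhs => rw [← List.dropLast_append_getLast hne]
        exact PySem.List.pop?_last _ _
      have hA : solveLoopF (f + 1) (x :: t) r =
          solveLoopF f (PySem.List.slice (x :: t).dropLast (some ((x :: t).getLast hne)) none) (r + 1) := by
        rw [solveLoopF_cons, erase_sort_eq_dropLast x t hp, pyMax_eq_getLast x t hp]
      have hB : altLoopF (f + 1) (x :: t) r =
          altLoopF f (PySem.List.slice (x :: t).dropLast (some ((x :: t).getLast hne)) none) (r + 1) := by
        simp only [altLoopF, hpop]
      rw [hA, hB]
      apply ih
      rw [PySem.List.slice_some_none]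
      exact List.Pairwise.sublist ((List.drop_sublist _ _).trans (List.dropLast_sublist _)) hp

-- ===== VERDICT (by name: the statement is the Claim_ definition above) =====
theorem solve_spec : Claim_equal_solve := by
  unfold Claim_equal_solve Spec_solve
  intro g _
  unfold solve solve_alt
  rw [solveLoopF_sorted]
  have hlen : g.length = (PySem.List.sorted g (fun y => y) false).length :=
    (PySem.List.length_sorted g (fun y => y) false).symm
  rw [hlen]
  exact main_corr _ _ 0 (PySem.List.sorted_pairwise g (fun y => y))
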